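-- pv_equiv track=rewrite | github.com/Bhanumadhavi/CN | exp21.py | char_stuffing
-- ===== SOURCE A (Python) =====
-- FLAG = 'F'   # Frame delimiter
--
-- ESC = 'E'    # Escape character
--
-- def char_stuffing(data):
--     stuffed_data = ''
--     for ch in data:
--         if ch == FLAG or ch == ESC:
--             stuffed_data += ESC  # Add escape before special char
--         stuffed_data += ch
--     # Add FLAG at start and end of frame
--     stuffed_data = FLAG + stuffed_data + FLAG
--     return stuffed_data
-- ===== SOURCE B (Python) =====
-- FLAG = 'F'
-- ESC = 'E'
--
-- def char_stuffing(data):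
--     return FLAG + data.replace(ESC, ESC + ESC).replace(FLAG, ESC + FLAG) + FLAG
-- ===== Notes on version B (the rewrite author's own statement) =====
-- stated objective: idiomatic
-- what changed: Replaces the per-character loop-with-conditional by two global str.replace passes (double ESC first, then prefix FLAG with ESC); same asymptotic cost but the work moves into C-level replace.
import Mathlib
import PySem

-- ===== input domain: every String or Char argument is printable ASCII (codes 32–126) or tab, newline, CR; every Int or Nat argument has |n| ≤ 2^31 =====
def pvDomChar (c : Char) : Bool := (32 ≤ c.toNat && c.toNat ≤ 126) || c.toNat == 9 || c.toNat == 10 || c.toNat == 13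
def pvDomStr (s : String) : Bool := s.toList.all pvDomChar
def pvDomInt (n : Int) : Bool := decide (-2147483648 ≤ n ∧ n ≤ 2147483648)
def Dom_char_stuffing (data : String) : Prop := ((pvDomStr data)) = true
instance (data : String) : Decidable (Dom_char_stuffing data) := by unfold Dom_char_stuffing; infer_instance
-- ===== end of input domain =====

-- B replaces A's per-character loop with two global str.replace passes (double ESC first, then prefix FLAG with ESC); same cost, no explicit loop or branch.
-- ===== PORT A =====
-- FLAG = 'F', ESC = 'E' (module constants; one-character strings, so 'ch == FLAG' is a char comparison)
def char_stuffing (data : String) : String :=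
  let stuffed_data : List Char :=
    data.toList.foldl (fun acc ch =>
      (if ch = 'F' ∨ ch = 'E' then acc ++ ['E'] else acc) ++ [ch]) []
  String.ofList ('F' :: stuffed_data ++ ['F'])

-- ===== PORT B =====
-- data.replace(ESC, ESC+ESC).replace(FLAG, ESC+FLAG), framed by FLAG; Str.replace is Chars.replace on .toList
def char_stuffing_alt (data : String) : String :=
  String.ofList ('F' ::
    PySem.Chars.replace (PySem.Chars.replace data.toList ['E'] ['E', 'E']) ['F'] ['E', 'F']
    ++ ['F'])

-- ===== PRECONDITION & SPEC =====
def Spec_char_stuffing (data : String) (out : String) : Prop := out = char_stuffing_alt data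
instance (data : String) (out : String) : Decidable (Spec_char_stuffing data out) := by unfold Spec_char_stuffing; infer_instance

-- ===== CLAIM (what is proved, stated in full; the proofs are below) =====
def Claim_equal_char_stuffing : Prop := ∀ (data : String), Dom_char_stuffing data → Spec_char_stuffing data (char_stuffing data)

-- ===== LEMMAS AND PROOFS =====

-- str.replace with a one-character pattern is a per-character flatMap
theorem replace_go_single (a : Char) (new : List Char) :
    ∀ (fuel : Nat) (l acc : List Char), l.length ≤ fuel →
      PySem.Chars.replace.go [a] new fuel l acc
        = acc.reverse ++ l.flatMap (fun c => if c = a then new else [c]) := by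
  intro fuel
  induction fuel with
  | zero =>
      intro l acc h
      have hl : l = [] := List.eq_nil_of_length_eq_zero (Nat.le_zero.mp h)
      subst hl
      simp [PySem.Chars.replace.go]
  | succ n ih =>
      intro l acc h
      cases l with
      | nil => simp [PySem.Chars.replace.go]
      | cons c t =>
        by_cases hca : c = a
        · subst hca
          have hpref : List.isPrefixOf [c] (c :: t) = true := by
            simp [List.isPrefixOf]
          simp only [PySem.Chars.replace.go, hpref, if_pos, List.length_cons,
            List.length_nil, List.drop_succ_cons, List.drop_zero]
          rw [ih t (new.reverse ++ acc) (by simpa using Nat.le_of_succ_le_succ h)]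
          simp
        · have hpref : List.isPrefixOf [a] (c :: t) = false := by
            simp [List.isPrefixOf]
            exact fun h' => (hca h'.symm).elim
          simp only [PySem.Chars.replace.go, hpref]
          rw [ih t (c :: acc) (by simpa using Nat.le_of_succ_le_succ h)]
          simp [hca]

theorem replace_single (a : Char) (new : List Char) (l : List Char) :
    PySem.Chars.replace l [a] new = l.flatMap (fun c => if c = a then new else [c]) := by
  have h := replace_go_single a new l.length l [] (le_refl _)
  simpa [PySem.Chars.replace] using h

-- ===== VERDICT (by name: the statement is the Claim_ definition above) =====
theorem char_stuffing_spec : Claim_equal_char_stuffing := by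
  intro data _
  unfold Spec_char_stuffing char_stuffing char_stuffing_alt
  rw [replace_single, replace_single]
  have hfold :
      data.toList.foldl (fun acc ch =>
        (if ch = 'F' ∨ ch = 'E' then acc ++ ['E'] else acc) ++ [ch]) []
      = data.toList.flatMap (fun ch => if ch = 'F' ∨ ch = 'E' then ['E', ch] else [ch]) := by
    refine (PySem.List.foldl_congr_mem data.toList _
      (fun acc ch => acc ++ (if ch = 'F' ∨ ch = 'E' then ['E', ch] else [ch])) []
      (by intro acc x _; split_ifs <;> simp <;> tauto)).trans ?_
    simpa using PySem.List.foldl_append_eq_flatMap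
      (fun ch => if ch = 'F' ∨ ch = 'E' then ['E', ch] else [ch]) data.toList []
  simp only [hfold, List.flatMap_assoc]
  congr 2
  congr 1
  apply List.flatMap_congr
  intro c _
  by_cases h1 : c = 'E' <;> by_cases h2 : c = 'F' <;> simp [h1, h2]
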